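-- pv_equiv track=rewrite | github.com/magnoazneto/IFPI_Algoritmos | AtiviadeMeioDisciplina/criptografia.py | trata_numeros
-- ===== SOURCE A (Python) =====
-- def trata_numeros(string):
--     i = 0
--     number = 0
--     new_str = ''
--     while i < len(string):
--         if is_number(string[i]):
--             number = int(string[i]) ** 2
--             if len(str(number)) > 1:
--                 new_str += comprime_numero(number)
--             else:
--                 new_str += str(number)
--         else:
--             new_str += string[i]
--         i += 1
--     return new_str
--
-- def comprime_numero(number):
--     i = 0
--     pocket = ''
--     number = str(number)
--     while i < len(number):
--         pocket += number[i]
--         i += 1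
--     return pocket
--
-- def is_number(char):
--     return ord(char) >= 48 and ord(char) <= 57
-- ===== SOURCE B (Python) =====
-- def trata_numeros(string):
--     table = {ord(d): str(int(d) ** 2) for d in '0123456789'}
--     return string.translate(table)
-- ===== Notes on version B (the rewrite author's own statement) =====
-- stated objective: idiomatic
-- what changed: Replaces the index-driven while loop with ord-range test, per-digit squaring and the redundant comprime_numero copy by a ten-entry ord->string translation table built once and a single str.translate pass.
import Mathlib
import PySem

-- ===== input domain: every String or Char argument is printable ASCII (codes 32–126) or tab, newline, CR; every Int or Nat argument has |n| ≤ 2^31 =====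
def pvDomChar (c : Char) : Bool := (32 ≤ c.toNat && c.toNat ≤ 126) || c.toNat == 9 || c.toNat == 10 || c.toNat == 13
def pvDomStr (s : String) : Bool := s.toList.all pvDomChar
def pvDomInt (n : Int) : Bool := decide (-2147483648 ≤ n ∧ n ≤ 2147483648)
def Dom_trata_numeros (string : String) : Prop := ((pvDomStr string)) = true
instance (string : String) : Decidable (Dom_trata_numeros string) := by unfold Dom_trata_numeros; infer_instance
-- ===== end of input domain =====

-- B replaces A's index-driven while loop and helper copy by a ten-entry translation table built once and one table-driven pass (objective: idiomatic).

-- ===== PORT A =====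
-- is_number(char)
def pv_is_number (c : Char) : Bool := 48 ≤ c.toNat && c.toNat ≤ 57
-- comprime_numero(number): copies str(number) char by char
def pv_comprime_numero (number : Int) : List Char :=
  (PySem.Int.toChars number).foldl (fun pocket ch => pocket ++ [ch]) []
-- the while loop visits string[0], string[1], … in order; int(string[i]) on a digit char is its value c.toNat - 48 (exact on the digit branch)
def trata_numeros (string : String) : String :=
  String.ofList (string.toList.foldl (fun new_str c =>
    if pv_is_number c then
      let number : Int := ((c.toNat : Int) - 48) ^ 2
      if (PySem.Int.toChars number).length > 1 then
        new_str ++ pv_comprime_numero number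
      else
        new_str ++ PySem.Int.toChars number
    else
      new_str ++ [c]) [])

-- ===== PORT B =====
-- table = {ord(d): str(int(d)**2) for d in '0123456789'}
def pv_table : PySem.Dict Nat (List Char) :=
  "0123456789".toList.foldl
    (fun d ch => d.insert ch.toNat (PySem.Int.toChars (((ch.toNat : Int) - 48) ^ 2)))
    PySem.Dict.empty
-- string.translate(table): per code point, the mapped string if the ordinal is a key, else the character itself
def trata_numeros_alt (string : String) : String :=
  String.ofList ((string.toList.map (fun c => (pv_table.get? c.toNat).getD [c])).flatten)

-- ===== PRECONDITION & SPEC =====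
def Spec_trata_numeros (string : String) (out : String) : Prop := out = trata_numeros_alt string
instance (string : String) (out : String) : Decidable (Spec_trata_numeros string out) := by unfold Spec_trata_numeros; infer_instance

-- ===== CLAIM (what is proved, stated in full; the proofs are below) =====
def Claim_equal_trata_numeros : Prop := ∀ (string : String), Dom_trata_numeros string → Spec_trata_numeros string (trata_numeros string)


-- ===== LEMMAS AND PROOFS =====

theorem pv_table_eval : pv_table = PySem.Dict.mk
    [(48, ['0']), (49, ['1']), (50, ['4']), (51, ['9']), (52, ['1','6']),
     (53, ['2','5']), (54, ['3','6']), (55, ['4','9']), (56, ['6','4']), (57, ['8','1'])] := by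
  decide

-- one step of A's loop body equals B's per-character translation
theorem pv_step_eq (acc : List Char) (c : Char) :
    (if pv_is_number c then
      let number : Int := ((c.toNat : Int) - 48) ^ 2
      if (PySem.Int.toChars number).length > 1 then
        acc ++ pv_comprime_numero number
      else
        acc ++ PySem.Int.toChars number
    else
      acc ++ [c]) = acc ++ (pv_table.get? c.toNat).getD [c] := by
  rw [pv_table_eval]
  by_cases h : 48 ≤ c.toNat ∧ c.toNat ≤ 57
  · obtain ⟨h1, h2⟩ := h
    interval_cases hn : c.toNat <;>
      simp [pv_is_number, hn, pv_comprime_numero, PySem.Dict.get?_mk_cons,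
        show PySem.Int.toChars 0 = ['0'] from by decide,
        show PySem.Int.toChars 1 = ['1'] from by decide,
        show PySem.Int.toChars 4 = ['4'] from by decide,
        show PySem.Int.toChars 9 = ['9'] from by decide,
        show PySem.Int.toChars 16 = ['1','6'] from by decide,
        show PySem.Int.toChars 25 = ['2','5'] from by decide,
        show PySem.Int.toChars 36 = ['3','6'] from by decide,
        show PySem.Int.toChars 49 = ['4','9'] from by decide,
        show PySem.Int.toChars 64 = ['6','4'] from by decide,
        show PySem.Int.toChars 81 = ['8','1'] from by decide]
  · have hb : pv_is_number c = false := by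
      simp only [pv_is_number, Bool.and_eq_false_iff, decide_eq_false_iff_not, not_le]
      omega
    rw [if_neg (by simp [hb])]
    simp only [PySem.Dict.get?_mk_cons, beq_iff_eq]
    have h48 : ¬ (48 = c.toNat) := by omega
    have h49 : ¬ (49 = c.toNat) := by omega
    have h50 : ¬ (50 = c.toNat) := by omega
    have h51 : ¬ (51 = c.toNat) := by omega
    have h52 : ¬ (52 = c.toNat) := by omega
    have h53 : ¬ (53 = c.toNat) := by omega
    have h54 : ¬ (54 = c.toNat) := by omega
    have h55 : ¬ (55 = c.toNat) := by omega
    have h56 : ¬ (56 = c.toNat) := by omega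
    have h57 : ¬ (57 = c.toNat) := by omega
    simp [h48, h49, h50, h51, h52, h53, h54, h55, h56, h57, PySem.Dict.get?]

-- A's whole loop against B's translated pieces, accumulator generalized
theorem pv_loop_eq (l : List Char) (acc : List Char) :
    l.foldl (fun new_str c =>
      if pv_is_number c then
        let number : Int := ((c.toNat : Int) - 48) ^ 2
        if (PySem.Int.toChars number).length > 1 then
          new_str ++ pv_comprime_numero number
        else
          new_str ++ PySem.Int.toChars number
      else
        new_str ++ [c]) acc
    = acc ++ (l.map (fun c => (pv_table.get? c.toNat).getD [c])).flatten := by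
  induction l generalizing acc with
  | nil => simp
  | cons c t ih =>
    simp only [List.foldl_cons, List.map_cons, List.flatten_cons]
    rw [pv_step_eq acc c, ih, List.append_assoc]

-- ===== VERDICT (by name: the statement is the Claim_ definition above) =====
theorem trata_numeros_spec : Claim_equal_trata_numeros := by
  intro s _
  unfold Spec_trata_numeros trata_numeros trata_numeros_alt
  rw [pv_loop_eq]
  simp
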